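-- pv_equiv track=rewrite | github.com/babayko/budg-intensive | day_3/comprehensions/task_1/implementation.py | great_comprehension
-- ===== SOURCE A (Python) =====
-- from math import sqrt
--
-- def great_comprehension(list1, list2, list3):
--     """
--     Возвращает список с перемноженными элементами списков list1, list2 и list3 согласно условию
--     """
--     return [x % 10 * 2 * int(sqrt(y)) * z
--             for x in list1
--             for y in list2
--             for z in list3
--             if (str(x)[0] == str(x)[-1] and x > 2)
--             and (99 < y < 1000 and y % 2 == 0)
--             and (z == 4 or z % 2 == 1)]
-- ===== SOURCE B (Python) =====
-- from math import isqrt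
--
--
-- def great_comprehension(list1, list2, list3):
--     """
--     Возвращает список с перемноженными элементами списков list1, list2 и list3 согласно условию
--     """
--     factors = [
--         [x % 10 * 2 for x in list1 if str(x)[0] == str(x)[-1] and x > 2],
--         [isqrt(y) for y in list2 if 99 < y < 1000 and y % 2 == 0],
--         [z for z in list3 if z == 4 or z % 2 == 1],
--     ]
--     acc = [1]
--     for fs in factors:
--         acc = [p * f for p in acc for f in fs]
--     return acc
-- ===== Notes on version B (the rewrite author's own statement) =====
-- stated objective: faster
-- what changed: Replaces the single fused triple-nested comprehension (all three conditions re-evaluated per (x,y,z) triple) by three independent filter+transform passes followed by a fold that repeatedly forms pairwise products starting from [1], so no triple-nested loop exists in B.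
import Mathlib
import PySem

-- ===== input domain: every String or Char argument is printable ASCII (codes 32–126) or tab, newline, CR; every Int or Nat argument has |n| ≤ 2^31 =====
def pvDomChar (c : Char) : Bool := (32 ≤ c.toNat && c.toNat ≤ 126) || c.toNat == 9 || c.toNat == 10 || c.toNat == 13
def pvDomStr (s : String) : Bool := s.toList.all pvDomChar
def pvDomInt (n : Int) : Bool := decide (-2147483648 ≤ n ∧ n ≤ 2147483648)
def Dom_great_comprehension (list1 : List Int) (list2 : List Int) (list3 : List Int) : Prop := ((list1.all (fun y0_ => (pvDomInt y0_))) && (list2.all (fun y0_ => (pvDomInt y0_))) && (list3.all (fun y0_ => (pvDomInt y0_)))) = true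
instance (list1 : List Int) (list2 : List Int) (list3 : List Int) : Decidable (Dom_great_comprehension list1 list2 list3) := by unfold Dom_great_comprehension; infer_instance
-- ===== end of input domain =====

-- B replaces A's fused triple-nested comprehension by three independent filter passes and a
-- fold of pairwise product steps starting from [1] (alternative decomposition, same results).

-- ===== PORT A =====
-- shared helper predicates, one per conjunct of the comprehension's condition
-- str(x)[0] == str(x)[-1] and x > 2
def pvCondX (x : Int) : Bool :=
  (PySem.Str.pyGet? (PySem.Int.toStr x) 0 == PySem.Str.pyGet? (PySem.Int.toStr x) (-1))
    && decide (x > 2)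
-- 99 < y < 1000 and y % 2 == 0
def pvCondY (y : Int) : Bool :=
  decide (99 < y) && decide (y < 1000) && (PySem.Int.mod y 2 == 0)
-- z == 4 or z % 2 == 1
def pvCondZ (z : Int) : Bool := (z == 4) || (PySem.Int.mod z 2 == 1)
-- int(sqrt(y)) in A / isqrt(y) in B: exact for the only values either applies it to
-- (100 ≤ y ≤ 998, where the double-precision sqrt truncated to int equals the integer sqrt)
def pvIntSqrt (y : Int) : Int := Int.ofNat (Nat.sqrt y.toNat)

-- A: one fused comprehension over all (x, y, z) triples with the combined condition
def great_comprehension (list1 : List Int) (list2 : List Int) (list3 : List Int) : List Int :=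
  list1.flatMap (fun x =>
    list2.flatMap (fun y =>
      list3.filterMap (fun z =>
        if pvCondX x && pvCondY y && pvCondZ z then
          some (PySem.Int.mod x 10 * 2 * pvIntSqrt y * z)
        else none)))

-- ===== PORT B =====
-- one pairwise-product step of B's fold: [p * f for p in acc for f in fs]
def pvProdStep (acc fs : List Int) : List Int :=
  acc.flatMap (fun p => fs.map (fun f => p * f))

-- B: three independent filter+transform passes, then a fold of pairwise products from [1]
def great_comprehension_alt (list1 : List Int) (list2 : List Int) (list3 : List Int) : List Int :=
  let factors : List (List Int) :=
    [ list1.filterMap (fun x => if pvCondX x then some (PySem.Int.mod x 10 * 2) else none),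
      list2.filterMap (fun y => if pvCondY y then some (pvIntSqrt y) else none),
      list3.filter (fun z => pvCondZ z) ]
  factors.foldl pvProdStep [1]

-- ===== PRECONDITION & SPEC =====
def Spec_great_comprehension (list1 : List Int) (list2 : List Int) (list3 : List Int) (out : List Int) : Prop := out = great_comprehension_alt list1 list2 list3
instance (list1 : List Int) (list2 : List Int) (list3 : List Int) (out : List Int) : Decidable (Spec_great_comprehension list1 list2 list3 out) := by unfold Spec_great_comprehension; infer_instance

-- ===== CLAIM (what is proved, stated in full; the proofs are below) =====
def Claim_equal_great_comprehension : Prop := ∀ (list1 : List Int) (list2 : List Int) (list3 : List Int), Dom_great_comprehension list1 list2 list3 → Spec_great_comprehension list1 list2 list3 (great_comprehension list1 list2 list3)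

-- ===== LEMMAS AND PROOFS =====

theorem step_one (a : List Int) : pvProdStep [1] a = a := by
  simp [pvProdStep]

theorem inner_z (e : Int) (l3 : List Int) :
    l3.filterMap (fun z => if pvCondZ z then some (e * z) else none)
      = (l3.filter (fun z => pvCondZ z)).map (fun cv => e * cv) := by
  induction l3 with
  | nil => rfl
  | cons z zs ih =>
    by_cases h : pvCondZ z = true <;> simp [h, ih]

theorem inner_y (av : Int) (l2 l3 : List Int) :
    l2.flatMap (fun y =>
        l3.filterMap (fun z =>
          if pvCondY y && pvCondZ z then some (av * pvIntSqrt y * z) else none))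
      = pvProdStep
          (pvProdStep [av] (l2.filterMap (fun y => if pvCondY y then some (pvIntSqrt y) else none)))
          (l3.filter (fun z => pvCondZ z)) := by
  induction l2 with
  | nil => rfl
  | cons y ys ih =>
    by_cases h : pvCondY y = true
    · simp only [List.flatMap_cons, List.filterMap_cons, h, Bool.true_and]
      rw [inner_z (av * pvIntSqrt y) l3, ih]
      simp [pvProdStep]
    · simp only [List.flatMap_cons, List.filterMap_cons, h, Bool.false_and]
      simpa using ih

theorem ports_eq (l1 l2 l3 : List Int) :
    great_comprehension l1 l2 l3 = great_comprehension_alt l1 l2 l3 := by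
  unfold great_comprehension great_comprehension_alt
  simp only [List.foldl_cons, List.foldl_nil, step_one]
  induction l1 with
  | nil => rfl
  | cons x xs ih =>
    by_cases h : pvCondX x = true
    · simp only [List.flatMap_cons, List.filterMap_cons, h, Bool.true_and]
      rw [ih]
      have := inner_y (PySem.Int.mod x 10 * 2) l2 l3
      simp only [pvProdStep, List.flatMap_cons, List.flatMap_nil, List.append_nil] at this ⊢
      rw [this]
      simp [List.flatMap_append]
    · rw [Bool.not_eq_true] at h
      have hnil : List.flatMap (fun y => l3.filterMap (fun z =>
          if (pvCondX x && pvCondY y && pvCondZ z) = true then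
            some (PySem.Int.mod x 10 * 2 * pvIntSqrt y * z) else none)) l2 = [] := by
        refine List.flatMap_eq_nil_iff.mpr (fun y _ => ?_)
        simp [h]
      rw [List.flatMap_cons, hnil, List.nil_append, ih, List.filterMap_cons,
        if_neg (by simp [h])]

-- ===== VERDICT (by name: the statement is the Claim_ definition above) =====
theorem great_comprehension_spec : Claim_equal_great_comprehension :=
  fun l1 l2 l3 _ => (ports_eq l1 l2 l3).symm ▸ rfl
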